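-- pv_equiv track=rewrite | github.com/tsuru7/algorithm-study | AtCoder/ABC/101-200/ABC167/E.py | solve
-- ===== SOURCE A (Python) =====
-- def solve(n,m,k):
--     MOD = 998244353
--     dp = [[0 for _ in range(k+1)] for _ in range(n+1)]
--     dp[1][0] = m
--     for i in range(2, n+1):
--         for j in range(min(i-1, k)+1):
--             dp[i][j] += dp[i-1][j]*(m-1)
--             if j-1 >= 0:
--                 dp[i][j] += dp[i-1][j-1]
--             dp[i][j] %= MOD
--     return sum(dp[n]) % MOD
-- ===== SOURCE B (Python) =====
-- def solve(n, m, k):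
--     # Closed form: answer = m * sum_{j=0}^{min(k,n-1)} C(n-1,j) * (m-1)^(n-1-j)  (mod 998244353),
--     # with the binomial maintained incrementally as an exact integer.
--     MOD = 998244353
--     t = min(k, n - 1)
--     c = 1
--     ans = 0
--     for j in range(t + 1):
--         if j > 0:
--             c = c * (n - j) // j
--         ans = (ans + c * pow(m - 1, n - 1 - j, MOD)) % MOD
--     return ans * m % MOD
-- ===== Notes on version B (the rewrite author's own statement) =====
-- stated objective: faster
-- what changed: Replaced the O(n*k) two-dimensional DP table with the closed form m * sum_{j=0}^{min(k,n-1)} C(n-1,j)*(m-1)^(n-1-j) mod 998244353, maintaining the binomial coefficient incrementally and using modular exponentiation, so only one O(k)-length loop remains.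
import Mathlib
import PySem

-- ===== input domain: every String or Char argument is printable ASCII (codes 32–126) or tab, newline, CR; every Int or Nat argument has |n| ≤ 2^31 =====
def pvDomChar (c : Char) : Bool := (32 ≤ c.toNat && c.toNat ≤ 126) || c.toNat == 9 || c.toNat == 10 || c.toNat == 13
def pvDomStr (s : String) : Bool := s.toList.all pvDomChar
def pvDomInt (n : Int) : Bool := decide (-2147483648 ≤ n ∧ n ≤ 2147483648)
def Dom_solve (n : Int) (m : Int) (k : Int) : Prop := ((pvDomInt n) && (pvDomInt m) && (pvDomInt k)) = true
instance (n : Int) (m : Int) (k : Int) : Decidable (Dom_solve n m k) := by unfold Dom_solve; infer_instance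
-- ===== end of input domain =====

-- B replaces A's O(n·k) two-dimensional DP table by the closed form
-- m * Σ_{j=0}^{min(k,n-1)} C(n-1,j)·(m-1)^(n-1-j) mod 998244353 with an incrementally
-- maintained exact binomial and modular exponentiation (objective: faster, one O(k) loop).

-- ===== PORT A =====
-- dp[i][j] read / write (indices are in range on every access A makes under Pre_solve,
-- so getD/set are exact there)
def pvDpGet (dp : Array (Array Int)) (i j : Nat) : Int := (dp.getD i #[]).getD j 0
def pvDpSet (dp : Array (Array Int)) (i j : Nat) (v : Int) : Array (Array Int) :=
  dp.modify i (fun row => row.set! j v)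
def pvAInner (m : Int) (i : Nat) (dp : Array (Array Int)) (j : Nat) : Array (Array Int) :=
  let v := pvDpGet dp i j + pvDpGet dp (i - 1) j * (m - 1)
  let v := if 1 ≤ j then v + pvDpGet dp (i - 1) (j - 1) else v
  pvDpSet dp i j (v % 998244353)
def pvAOuter (m : Int) (K : Nat) (dp : Array (Array Int)) (i : Nat) : Array (Array Int) :=
  (List.range (min (i - 1) K + 1)).foldl (pvAInner m i) dp
def solve (n : Int) (m : Int) (k : Int) : Int :=
  let N := n.toNat
  let K := k.toNat
  let dp0 : Array (Array Int) := Array.replicate (N + 1) (Array.replicate (K + 1) 0)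
  let dp1 := pvDpSet dp0 1 0 m
  let dp := (List.range' 2 (N - 1)).foldl (pvAOuter m K) dp1
  ((dp.getD N #[]).foldl (· + ·) 0) % 998244353
-- ===== PORT B =====
-- one step of B's loop over j: update the exact running binomial c = C(n-1,j)
-- (Python '//' is PySem.Int.floordiv; pow(m-1, n-1-j, MOD) is PySem.Int.powMod,
-- exponent n-1-j ≥ 0 inside the loop)
def pvBStep (n m : Int) (s : Int × Int) (j : Nat) : Int × Int :=
  let c := if 0 < j then PySem.Int.floordiv (s.1 * (n - (j : Int))) (j : Int) else s.1
  (c, (s.2 + c * PySem.Int.powMod (m - 1) (n - 1 - (j : Int)).toNat 998244353) % 998244353)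

-- Port of B: range(t+1) with t = min(k, n-1); final 'ans * m % MOD' with MOD > 0.
def solve_alt (n : Int) (m : Int) (k : Int) : Int :=
  let t := min k (n - 1)
  let s := (List.range (t + 1).toNat).foldl (pvBStep n m) (1, 0)
  s.2 * m % 998244353

-- ===== PRECONDITION & SPEC =====
-- Pre_solve excludes exactly the inputs where A raises IndexError: dp[1][0] = m needs
-- row 1 (n ≥ 1) and column 0 (k ≥ 0) to exist.
def Pre_solve (n : Int) (m : Int) (k : Int) : Prop := 1 ≤ n ∧ 0 ≤ k
instance (n : Int) (m : Int) (k : Int) : Decidable (Pre_solve n m k) := by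
  unfold Pre_solve; infer_instance
def pvWitness_solve : Int × Int × Int := (4, 3, 2)

def Spec_solve (n : Int) (m : Int) (k : Int) (out : Int) : Prop := out = solve_alt n m k
instance (n : Int) (m : Int) (k : Int) (out : Int) : Decidable (Spec_solve n m k out) := by
  unfold Spec_solve; infer_instance

-- ===== CLAIM (what is proved, stated in full; the proofs are below) =====
def Claim_equal_solve : Prop :=
  ∀ (n : Int) (m : Int) (k : Int), Dom_solve n m k → Pre_solve n m k →
    Spec_solve n m k (solve n m k)

-- ===== LEMMAS AND PROOFS =====

-- list model of the array dp and bridges (proof layer)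
def pvDpGetL (dp : List (List Int)) (i j : Nat) : Int := (dp.getD i []).getD j 0
def pvDpSetL (dp : List (List Int)) (i j : Nat) (v : Int) : List (List Int) :=
  dp.set i ((dp.getD i []).set j v)
def pvAInnerL (m : Int) (i : Nat) (dp : List (List Int)) (j : Nat) : List (List Int) :=
  let v := pvDpGetL dp i j + pvDpGetL dp (i - 1) j * (m - 1)
  let v := if 1 ≤ j then v + pvDpGetL dp (i - 1) (j - 1) else v
  pvDpSetL dp i j (v % 998244353)
def pvAOuterL (m : Int) (K : Nat) (dp : List (List Int)) (i : Nat) : List (List Int) :=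
  (List.range (min (i - 1) K + 1)).foldl (pvAInnerL m i) dp
def pvArr (L : List (List Int)) : Array (Array Int) := (L.map List.toArray).toArray

lemma pvRowGetD (l : List Int) (j : Nat) : l.toArray.getD j 0 = l.getD j 0 := by
  by_cases h : j < l.length
  · simp [Array.getD, h]
  · simp [Array.getD, h]

lemma pvArrGetRow (L : List (List Int)) (i : Nat) :
    (pvArr L).getD i #[] = (L.getD i []).toArray := by
  unfold pvArr
  by_cases h : i < L.length
  · simp [Array.getD, h]
  · simp [Array.getD, h]

lemma pvGet_bridge (L : List (List Int)) (i j : Nat) :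
    pvDpGet (pvArr L) i j = pvDpGetL L i j := by
  unfold pvDpGet pvDpGetL
  rw [pvArrGetRow, pvRowGetD]

lemma pvModifyMap (f : Array Int → Array Int) (f' : List Int → List Int)
    (L : List (List Int)) (i : Nat) (h : ∀ x, f x.toArray = (f' x).toArray) :
    (L.map List.toArray).modify i f = (L.modify i f').map List.toArray := by
  induction L generalizing i with
  | nil => simp
  | cons a L ih =>
    cases i with
    | zero => simp [List.modify, h]
    | succ i =>
      simp only [List.modify, List.modifyTailIdx_succ_cons, List.map_cons]
      rw [← List.modify, ← List.modify, ih]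

lemma pvModifySet (L : List (List Int)) (i j : Nat) (v : Int) :
    L.modify i (fun row => row.set j v) = pvDpSetL L i j v := by
  unfold pvDpSetL
  induction L generalizing i with
  | nil => simp
  | cons a L ih =>
    cases i with
    | zero => simp [List.modify]
    | succ i =>
      rw [List.getD_cons_succ, List.set_cons_succ]
      have hstep : (a :: L).modify (i + 1) (fun row => row.set j v)
          = a :: L.modify i (fun row => row.set j v) := by
        simp [List.modify, List.modifyTailIdx_succ_cons]
      rw [hstep, ih]

lemma pvSet_bridge (L : List (List Int)) (i j : Nat) (v : Int) :
    pvDpSet (pvArr L) i j v = pvArr (pvDpSetL L i j v) := by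
  unfold pvDpSet pvArr
  apply Array.ext'
  rw [Array.toList_modify]
  rw [pvModifyMap _ (fun row => row.set j v) L i
    (fun x => by simp [Array.set!_eq_setIfInBounds, List.setIfInBounds_toArray]),
    pvModifySet]

lemma pvInner_bridge (m : Int) (i : Nat) (L : List (List Int)) (j : Nat) :
    pvAInner m i (pvArr L) j = pvArr (pvAInnerL m i L j) := by
  unfold pvAInner pvAInnerL
  show pvDpSet (pvArr L) i j
      ((if 1 ≤ j then (pvDpGet (pvArr L) i j + pvDpGet (pvArr L) (i - 1) j * (m - 1)) +
          pvDpGet (pvArr L) (i - 1) (j - 1)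
        else pvDpGet (pvArr L) i j + pvDpGet (pvArr L) (i - 1) j * (m - 1)) % 998244353)
    = pvArr (pvDpSetL L i j
      ((if 1 ≤ j then (pvDpGetL L i j + pvDpGetL L (i - 1) j * (m - 1)) +
          pvDpGetL L (i - 1) (j - 1)
        else pvDpGetL L i j + pvDpGetL L (i - 1) j * (m - 1)) % 998244353))
  simp only [pvGet_bridge, pvSet_bridge]

lemma pvFold_bridge {β : Type} (fA : Array (Array Int) → β → Array (Array Int))
    (fL : List (List Int) → β → List (List Int))
    (h : ∀ L j, fA (pvArr L) j = pvArr (fL L j)) (js : List β) (L : List (List Int)) :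
    js.foldl fA (pvArr L) = pvArr (js.foldl fL L) := by
  induction js generalizing L with
  | nil => rfl
  | cons j js ih => rw [List.foldl_cons, List.foldl_cons, h, ih]

lemma pvOuter_bridge (m : Int) (K : Nat) (L : List (List Int)) (i : Nat) :
    pvAOuter m K (pvArr L) i = pvArr (pvAOuterL m K L i) := by
  unfold pvAOuter pvAOuterL
  exact pvFold_bridge _ _ (fun L j => pvInner_bridge m i L j) _ L

lemma pvRepl_bridge (a b : Nat) :
    Array.replicate a (Array.replicate b (0 : Int))
      = pvArr (List.replicate a (List.replicate b 0)) := by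
  apply Array.ext'
  simp [pvArr, List.map_replicate]


def pvTerm (N : Nat) (m : Int) (j : Nat) : Int :=
  m * ((N - 1).choose j : Int) * (m - 1) ^ (N - 1 - j)
def pvRowF (m : Int) (K r j : Nat) : Int :=
  if r = 1 then (if j = 0 then m else 0)
  else if j ≤ min (r - 1) K then pvTerm r m j % 998244353 else 0
def pvRow (m : Int) (K r : Nat) : List Int := (List.range (K + 1)).map (pvRowF m K r)
def pvMat (m : Int) (N K i₀ : Nat) : List (List Int) :=
  (List.range (N + 1)).map fun r =>
    if 1 ≤ r ∧ r ≤ i₀ then pvRow m K r else List.replicate (K + 1) 0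
def pvMatP (m : Int) (N K i c : Nat) : List (List Int) :=
  (List.range (N + 1)).map fun r =>
    if 1 ≤ r ∧ r ≤ i - 1 then pvRow m K r
    else if r = i then (List.range (K + 1)).map (fun j => if j < c then pvRowF m K i j else 0)
    else List.replicate (K + 1) 0
lemma pvSet_map_range {α : Type} (f : Nat → α) (L r : Nat) (v : α) :
    ((List.range L).map f).set r v = (List.range L).map fun x => if x = r then v else f x := by
  apply List.ext_getElem (by simp)
  intro i h1 h2
  simp only [List.getElem_set, List.getElem_map, List.getElem_range]
  rcases eq_or_ne r i with h | h
  · simp [h]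
  · rw [if_neg h, if_neg h.symm]
lemma pvRowF_congr (m : Int) (K r j : Nat) (hr : 1 ≤ r) (hj : j ≤ K) :
    pvRowF m K r j ≡ pvTerm r m j [ZMOD 998244353] := by
  unfold pvRowF
  by_cases hr1 : r = 1
  · subst hr1
    rw [if_pos rfl]
    by_cases hj0 : j = 0
    · subst hj0; simp [pvTerm]
    · rw [if_neg hj0]
      unfold pvTerm
      rw [(by omega : (1:Nat) - 1 = 0), Nat.choose_eq_zero_of_lt (by omega : 0 < j)]
      simp
  · rw [if_neg hr1]
    by_cases hle : j ≤ min (r - 1) K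
    · rw [if_pos hle]
      exact Int.emod_emod_of_dvd _ dvd_rfl
    · rw [if_neg hle]
      unfold pvTerm
      simp [Nat.choose_eq_zero_of_lt (by omega : r - 1 < j)]
lemma pvPascal (m : Int) (i j : Nat) (hi : 2 ≤ i) (hj : j ≤ i - 1) :
    pvTerm (i - 1) m j * (m - 1) + (if 1 ≤ j then pvTerm (i - 1) m (j - 1) else 0)
      = pvTerm i m j := by
  obtain ⟨i', rfl⟩ : ∃ i', i = i' + 2 := ⟨i - 2, by omega⟩
  unfold pvTerm
  have e0 : i' + 2 - 1 = i' + 1 := by omega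
  rw [e0]
  have e0' : i' + 1 - 1 = i' := by omega
  rw [e0']
  by_cases hjp : 1 ≤ j
  · rw [if_pos hjp]
    obtain ⟨j', rfl⟩ : ∃ j', j = j' + 1 := ⟨j - 1, by omega⟩
    have e1 : j' + 1 - 1 = j' := by omega
    rw [e1]
    by_cases hje : j' + 1 ≤ i'
    · have e2 : i' - j' = i' - (j' + 1) + 1 := by omega
      have e3 : i' + 1 - (j' + 1) = i' - (j' + 1) + 1 := by omega
      rw [Nat.choose_succ_succ, e2, e3, pow_succ]
      push_cast
      ring
    · have hi' : i' = j' := by omega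
      rw [hi']
      simp [Nat.choose_self, (by omega : j' - (j' + 1) = 0)]
  · rw [if_neg hjp]
    have hj0 : j = 0 := by omega
    subst hj0
    simp [pow_succ, (by omega : i' + 1 - 0 = i' + 0 + 1)]
    ring

lemma pvStep (m : Int) (K i j : Nat) (hi : 2 ≤ i) (hj : j ≤ min (i - 1) K) :
    ((0 + pvRowF m K (i - 1) j * (m - 1)) +
        (if 1 ≤ j then pvRowF m K (i - 1) (j - 1) else 0)) % 998244353
      = pvTerm i m j % 998244353 := by
  rw [zero_add]
  have hjK : j ≤ K := le_trans hj (min_le_right _ _)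
  have h1 := pvRowF_congr m K (i - 1) j (by omega) hjK
  have h2 : (if 1 ≤ j then pvRowF m K (i - 1) (j - 1) else 0)
      ≡ (if 1 ≤ j then pvTerm (i - 1) m (j - 1) else 0) [ZMOD 998244353] := by
    split
    · exact pvRowF_congr m K (i - 1) (j - 1) (by omega) (by omega)
    · exact Int.ModEq.refl 0
  have h3 : pvRowF m K (i - 1) j * (m - 1) +
      (if 1 ≤ j then pvRowF m K (i - 1) (j - 1) else 0) ≡ pvTerm i m j [ZMOD 998244353] :=
    ((h1.mul_right (m - 1)).add h2).trans
      (by rw [pvPascal m i j hi (le_trans hj (min_le_left _ _))])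
  exact h3

lemma pvMatP_getD_top (m : Int) (N K i c : Nat) (hi : 2 ≤ i) (hiN : i ≤ N) :
    (pvMatP m N K i c).getD i []
      = (List.range (K + 1)).map (fun j => if j < c then pvRowF m K i j else 0) := by
  unfold pvMatP
  rw [PySem.List.getD_map_range _ _ _ _ (by omega)]
  rw [if_neg (by omega), if_pos rfl]

lemma pvMatP_getD_prev (m : Int) (N K i c : Nat) (hi : 2 ≤ i) (hiN : i ≤ N) :
    (pvMatP m N K i c).getD (i - 1) [] = pvRow m K (i - 1) := by
  unfold pvMatP
  rw [PySem.List.getD_map_range _ _ _ _ (by omega)]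
  rw [if_pos (by omega)]

lemma pvRow_getD (m : Int) (K r j : Nat) (hj : j ≤ K) :
    (pvRow m K r).getD j 0 = pvRowF m K r j := by
  unfold pvRow
  exact PySem.List.getD_map_range _ _ _ _ (by omega)

lemma pvAInner_matP (m : Int) (N K i c : Nat) (hi : 2 ≤ i) (hiN : i ≤ N)
    (hc : c ≤ min (i - 1) K) :
    pvAInnerL m i (pvMatP m N K i c) c = pvMatP m N K i (c + 1) := by
  have hcK : c ≤ K := le_trans hc (min_le_right _ _)
  unfold pvAInnerL
  have hget0 : pvDpGetL (pvMatP m N K i c) i c = 0 := by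
    unfold pvDpGetL
    rw [pvMatP_getD_top m N K i c hi hiN,
      PySem.List.getD_map_range _ _ _ _ (by omega), if_neg (by omega)]
  have hgetp : ∀ j, j ≤ K → pvDpGetL (pvMatP m N K i c) (i - 1) j = pvRowF m K (i - 1) j := by
    intro j hj
    unfold pvDpGetL
    rw [pvMatP_getD_prev m N K i c hi hiN, pvRow_getD m K (i - 1) j hj]
  rw [hget0, hgetp c hcK]
  have hval : (if 1 ≤ c then (0 + pvRowF m K (i - 1) c * (m - 1)) +
        pvDpGetL (pvMatP m N K i c) (i - 1) (c - 1)
      else (0 + pvRowF m K (i - 1) c * (m - 1))) % 998244353 = pvRowF m K i c := by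
    have hsplit : (if 1 ≤ c then (0 + pvRowF m K (i - 1) c * (m - 1)) +
          pvDpGetL (pvMatP m N K i c) (i - 1) (c - 1)
        else (0 + pvRowF m K (i - 1) c * (m - 1)))
        = (0 + pvRowF m K (i - 1) c * (m - 1)) +
          (if 1 ≤ c then pvRowF m K (i - 1) (c - 1) else 0) := by
      split
      · rw [hgetp (c - 1) (by omega)]
      · rw [add_zero]
    rw [hsplit, pvStep m K i c hi hc]
    unfold pvRowF
    rw [if_neg (by omega), if_pos hc]
  show pvDpSetL (pvMatP m N K i c) i c
      ((if 1 ≤ c then (0 + pvRowF m K (i - 1) c * (m - 1)) +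
          pvDpGetL (pvMatP m N K i c) (i - 1) (c - 1)
        else (0 + pvRowF m K (i - 1) c * (m - 1))) % 998244353)
      = pvMatP m N K i (c + 1)
  rw [hval]
  unfold pvDpSetL
  rw [pvMatP_getD_top m N K i c hi hiN, pvSet_map_range]
  have hfun : (fun x => if x = c then pvRowF m K i c
        else if x < c then pvRowF m K i x else 0)
      = (fun j => if j < c + 1 then pvRowF m K i j else 0) := by
    funext x
    by_cases hx : x = c
    · subst hx; simp
    · by_cases hx2 : x < c
      · rw [if_neg hx, if_pos hx2, if_pos (by omega)]
      · rw [if_neg hx, if_neg hx2, if_neg (by omega)]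
  rw [hfun]
  unfold pvMatP
  rw [pvSet_map_range]
  congr 1
  funext r
  by_cases hr : r = i
  · subst hr
    rw [if_pos rfl, if_neg (by omega), if_pos rfl]
  · rw [if_neg hr]
    by_cases hr2 : 1 ≤ r ∧ r ≤ i - 1
    · rw [if_pos hr2, if_pos hr2]
    · rw [if_neg hr2, if_neg hr, if_neg hr2, if_neg hr]

lemma pvMatP_zero (m : Int) (N K i : Nat) :
    pvMatP m N K i 0 = pvMat m N K (i - 1) := by
  unfold pvMatP pvMat
  congr 1
  funext r
  by_cases h1 : 1 ≤ r ∧ r ≤ i - 1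
  · rw [if_pos h1, if_pos h1]
  · rw [if_neg h1, if_neg h1]
    by_cases h2 : r = i
    · rw [if_pos h2]
      simp
    · rw [if_neg h2]

lemma pvMatP_full (m : Int) (N K i : Nat) (hi : 2 ≤ i) :
    pvMatP m N K i (min (i - 1) K + 1) = pvMat m N K i := by
  unfold pvMatP pvMat
  congr 1
  funext r
  by_cases h1 : 1 ≤ r ∧ r ≤ i - 1
  · rw [if_pos h1, if_pos (by omega)]
  · rw [if_neg h1]
    by_cases h2 : r = i
    · rw [h2, if_pos rfl, if_pos (by omega)]
      unfold pvRow
      apply List.map_congr_left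
      intro j _
      by_cases hj : j < min (i - 1) K + 1
      · rw [if_pos hj]
      · rw [if_neg hj]
        unfold pvRowF
        rw [if_neg (by omega), if_neg (by omega)]
    · rw [if_neg h2, if_neg (by omega)]

lemma pvInnerFold (m : Int) (N K i : Nat) (hi : 2 ≤ i) (hiN : i ≤ N) :
    ∀ c, c ≤ min (i - 1) K + 1 →
      (List.range c).foldl (pvAInnerL m i) (pvMatP m N K i 0) = pvMatP m N K i c := by
  intro c
  induction c with
  | zero => intro _; rfl
  | succ c ih =>
    intro hc
    rw [List.range_succ, List.foldl_append, ih (by omega)]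
    exact pvAInner_matP m N K i c hi hiN (by omega)

lemma pvAOuter_mat (m : Int) (N K i : Nat) (hi : 2 ≤ i) (hiN : i ≤ N) :
    pvAOuterL m K (pvMat m N K (i - 1)) i = pvMat m N K i := by
  unfold pvAOuterL
  rw [← pvMatP_zero m N K i, pvInnerFold m N K i hi hiN _ le_rfl,
    pvMatP_full m N K i hi]

lemma pvOuterFold (m : Int) (N K : Nat) (hN : 1 ≤ N) :
    ∀ c, c ≤ N - 1 →
      (List.range' 2 c).foldl (pvAOuterL m K) (pvMat m N K 1) = pvMat m N K (c + 1) := by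
  intro c
  induction c with
  | zero => intro _; rfl
  | succ c ih =>
    intro hc
    rw [List.range'_concat, List.foldl_append, ih (by omega)]
    have h2 : 2 + 1 * c = c + 2 := by omega
    rw [h2]
    have := pvAOuter_mat m N K (c + 2) (by omega) (by omega)
    rw [(by omega : c + 2 - 1 = c + 1)] at this
    exact this

lemma pvBase (m : Int) (N K : Nat) (hN : 1 ≤ N) :
    pvDpSetL (List.replicate (N + 1) (List.replicate (K + 1) 0)) 1 0 m = pvMat m N K 1 := by
  unfold pvDpSetL pvMat
  apply List.ext_getElem (by simp)
  intro r h1 h2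
  simp only [List.length_set, List.length_replicate] at h1
  rw [List.getElem_set]
  simp only [List.getElem_map, List.getElem_range, List.getElem_replicate]
  by_cases hr : 1 = r
  · rw [if_pos hr, if_pos (by omega)]
    rw [List.getD_eq_getElem _ _ (by simp; omega), List.getElem_replicate]
    apply List.ext_getElem (by simp [pvRow])
    intro j hj1 hj2
    simp only [List.length_set, List.length_replicate] at hj1
    rw [List.getElem_set]
    unfold pvRow
    simp only [List.getElem_map, List.getElem_range, List.getElem_replicate]
    unfold pvRowF
    rw [← hr, if_pos rfl]
    by_cases hj : 0 = j
    · rw [if_pos hj, if_pos hj.symm]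
    · rw [if_neg hj, if_neg (fun hh => hj hh.symm)]
  · rw [if_neg hr, if_neg (by omega)]

lemma pvListRangeSum (f : Nat → Int) (L : Nat) :
    ((List.range L).map f).sum = ∑ j ∈ Finset.range L, f j := Int.neg_inj.mp rfl

lemma pvRowSum (m : Int) (N K : Nat) (hN : 1 ≤ N) :
    (pvRow m K N).sum % 998244353
      = (∑ j ∈ Finset.range (K + 1), pvTerm N m j) % 998244353 := by
  unfold pvRow
  rw [pvListRangeSum, Finset.sum_int_mod,
    Finset.sum_congr rfl (fun j hj => by
      exact pvRowF_congr m K N j hN (by simpa using Nat.lt_succ_iff.mp (Finset.mem_range.mp hj))),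
    ← Finset.sum_int_mod]

lemma pvSolveA (n m k : Int) (hn : 1 ≤ n) (_hk : 0 ≤ k) :
    solve n m k = (∑ j ∈ Finset.range (k.toNat + 1), pvTerm n.toNat m j) % 998244353 := by
  unfold solve
  have hN : 1 ≤ n.toNat := by omega
  show (((List.range' 2 (n.toNat - 1)).foldl (pvAOuter m k.toNat)
      (pvDpSet (Array.replicate (n.toNat + 1) (Array.replicate (k.toNat + 1) 0)) 1 0 m)).getD
        n.toNat #[]).foldl (· + ·) 0 % 998244353
    = (∑ j ∈ Finset.range (k.toNat + 1), pvTerm n.toNat m j) % 998244353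
  rw [pvRepl_bridge, pvSet_bridge, pvBase m n.toNat k.toNat hN,
    pvFold_bridge _ _ (fun L i => pvOuter_bridge m k.toNat L i) _ _,
    pvOuterFold m n.toNat k.toNat hN (n.toNat - 1) le_rfl,
    (by omega : n.toNat - 1 + 1 = n.toNat), pvArrGetRow, List.foldl_toArray]
  unfold pvMat
  rw [PySem.List.getD_map_range _ _ _ _ (by omega), if_pos (by omega),
    ← List.sum_eq_foldl, pvRowSum m n.toNat k.toNat hN]

lemma pvBFold (n m : Int) (N : Nat) (hNn : n = (N : Int)) (hN1 : 1 ≤ N) :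
    ∀ c, 1 ≤ c → c ≤ N →
      (List.range c).foldl (pvBStep n m) (1, 0)
        = (((N - 1).choose (c - 1) : Int),
           (∑ j ∈ Finset.range c,
             ((N - 1).choose j : Int) * (m - 1) ^ (N - 1 - j)) % 998244353) := by
  intro c
  induction c with
  | zero => omega
  | succ c ih =>
    intro _ hc
    by_cases hc1 : c = 0
    · subst hc1
      subst hNn
      show pvBStep _ m (1, 0) 0 = _
      unfold pvBStep
      rw [if_neg (by omega)]
      simp only [Nat.cast_zero, sub_zero] at *
      rw [PySem.Int.powMod_eq_emod _ _ (by norm_num),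
        (by omega : ((N : Int) - 1).toNat = N - 1)]
      simp [Int.emod_emod_of_dvd]
    · rw [List.range_succ, List.foldl_append, ih (by omega) (by omega)]
      subst hNn
      show pvBStep _ m _ c = _
      unfold pvBStep
      rw [if_pos (by omega)]
      have hcast : ((N : Int) - (c : Int)) = ((N - c : Nat) : Int) := by
        omega
      have hchoose : ((N - 1).choose (c - 1)) * (N - c) = (N - 1).choose c * c := by
        obtain ⟨c', rfl⟩ : ∃ c', c = c' + 1 := ⟨c - 1, by omega⟩
        rw [Nat.add_sub_cancel, Nat.choose_succ_right_eq,
          (by omega : N - 1 - c' = N - (c' + 1))]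
      have hbin : PySem.Int.floordiv
          ((((N - 1).choose (c - 1) : Nat) : Int) * ((N : Int) - (c : Int))) (c : Int)
          = (((N - 1).choose c : Nat) : Int) := by
        rw [hcast, ← Nat.cast_mul, PySem.Int.floordiv_natCast, hchoose,
          Nat.mul_div_cancel _ (by omega : 0 < c)]
      simp only [hbin]
      simp only [Prod.mk.injEq]
      refine ⟨by norm_num, ?_⟩
      · rw [PySem.Int.powMod_eq_emod _ _ (by norm_num),
          (by omega : ((N : Int) - 1 - (c : Int)).toNat = N - 1 - c),
          Finset.sum_range_succ]
        exact Int.ModEq.add (Int.emod_emod_of_dvd _ dvd_rfl)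
          (Int.ModEq.mul (Int.ModEq.refl _) (Int.emod_emod_of_dvd _ dvd_rfl))

lemma pvSolveB (n m k : Int) (hn : 1 ≤ n) (hk : 0 ≤ k) :
    solve_alt n m k = (∑ j ∈ Finset.range (k.toNat + 1), pvTerm n.toNat m j) % 998244353 := by
  unfold solve_alt
  show ((List.range (min k (n - 1) + 1).toNat).foldl (pvBStep n m) (1, 0)).2 * m % 998244353
    = (∑ j ∈ Finset.range (k.toNat + 1), pvTerm n.toNat m j) % 998244353
  have htN : (min k (n - 1) + 1).toNat = min k.toNat (n.toNat - 1) + 1 := by omega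
  rw [htN, pvBFold n m n.toNat (by omega) (by omega) _ (by omega) (by omega)]
  have htrunc : ∑ j ∈ Finset.range (k.toNat + 1), pvTerm n.toNat m j
      = ∑ j ∈ Finset.range (min k.toNat (n.toNat - 1) + 1), pvTerm n.toNat m j := by
    have hsub : min k.toNat (n.toNat - 1) + 1 ≤ k.toNat + 1 := by omega
    refine (Finset.sum_subset (Finset.range_subset_range.mpr hsub) ?_).symm
    intro j hj hnj
    rw [Finset.mem_range] at hj
    rw [Finset.mem_range] at hnj
    unfold pvTerm
    rw [Nat.choose_eq_zero_of_lt (by omega)]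
    simp
  rw [htrunc]
  have hsum : ∑ j ∈ Finset.range (min k.toNat (n.toNat - 1) + 1), pvTerm n.toNat m j
      = m * ∑ j ∈ Finset.range (min k.toNat (n.toNat - 1) + 1),
          ((n.toNat - 1).choose j : Int) * (m - 1) ^ (n.toNat - 1 - j) := by
    rw [Finset.mul_sum]
    refine Finset.sum_congr rfl fun j _ => ?_
    unfold pvTerm
    ring
  rw [hsum]
  exact (Int.ModEq.mul_right m (Int.emod_emod_of_dvd _ dvd_rfl)).trans (by rw [mul_comm])

-- ===== VERDICT (by name: the statement is the Claim_ definition above) =====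
theorem solve_spec : Claim_equal_solve := by
  intro n m k _hd hp
  have hp' : 1 ≤ n ∧ 0 ≤ k := hp
  unfold Spec_solve
  rw [pvSolveA n m k hp'.1 hp'.2, pvSolveB n m k hp'.1 hp'.2]
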